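-- pv_equiv track=rewrite | github.com/Mariohnn/MarioStorage | PostgreSQL DB-filling+queries/File_to_DB (Python-PostgreSQL).py | prepara_categoria
-- ===== SOURCE A (Python) =====
-- def prepara_categoria(categoria):
--     characters = "|[1234567890"
--     for x in range(len(characters)):
--         categoria = categoria.replace(characters[x],"")
--     categoria = categoria.replace("]",",")
--     categoria = categoria.split(",")
--     categoria = categoria[:-1]
--     return categoria
-- ===== SOURCE B (Python) =====
-- def prepara_categoria(categoria):
--     # Single pass over the characters: drop '|', '[' and digits; ']' and ','
--     # both end the current token. The token still open at the end of the
--     # string is discarded (it is the piece A's [:-1] drops).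
--     tokens = []
--     cur = ""
--     for ch in categoria:
--         if ch in "|[0123456789":
--             continue
--         elif ch in "],":
--             tokens.append(cur)
--             cur = ""
--         else:
--             cur += ch
--     return tokens
-- ===== Notes on version B (the rewrite author's own statement) =====
-- stated objective: simpler
-- what changed: Replaced the twelve sequential str.replace passes plus the replace/split/[:-1] pipeline with one single pass over the characters that skips the deleted characters, closes the current token at either delimiter, and discards the unfinished final token (exactly the piece the [:-1] slice dropped).
import Mathlib
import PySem

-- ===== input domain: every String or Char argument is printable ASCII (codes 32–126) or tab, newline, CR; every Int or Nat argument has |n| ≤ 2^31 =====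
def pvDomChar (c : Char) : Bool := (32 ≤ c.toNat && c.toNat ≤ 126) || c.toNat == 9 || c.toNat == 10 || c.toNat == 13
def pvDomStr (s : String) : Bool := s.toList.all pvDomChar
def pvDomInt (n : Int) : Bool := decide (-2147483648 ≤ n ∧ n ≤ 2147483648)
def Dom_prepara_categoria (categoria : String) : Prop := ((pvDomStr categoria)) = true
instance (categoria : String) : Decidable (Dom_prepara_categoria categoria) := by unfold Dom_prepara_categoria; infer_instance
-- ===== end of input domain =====

-- B replaces A's thirteen replace/split/slice passes by one single pass over the characters (objective: simpler).

-- ===== PORT A =====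
def prepara_categoria (categoria : String) : List String :=
  let characters := "|[1234567890"
  let cat1 := (PySem.List.pyRange 0 (PySem.Str.len characters) 1).foldl
    (fun s x =>
      match PySem.Str.pyGet? characters x with
      | some ch => PySem.Str.replace s (String.ofList [ch]) ""
      | none => s)   -- unreachable: x ranges over 0 … len-1, so indexing never fails
    categoria
  let cat2 := PySem.Str.replace cat1 "]" ","
  ((PySem.Str.split? cat2 ",").map
    (fun parts => PySem.List.slice parts none (some (-1)))).getD []   -- getD unreachable: "," ≠ ""

-- ===== PORT B =====
def pcStep (st : List String × String) (c : Char) : List String × String :=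
  if ("|[0123456789".toList.contains c) then st
  else if ("],".toList.contains c) then (st.1 ++ [st.2], "")
  else (st.1, st.2.push c)

def prepara_categoria_alt (categoria : String) : List String :=
  (categoria.toList.foldl pcStep ([], "")).1

-- ===== PRECONDITION & SPEC =====
def Spec_prepara_categoria (categoria : String) (out : List String) : Prop := out = prepara_categoria_alt categoria
instance (categoria : String) (out : List String) : Decidable (Spec_prepara_categoria categoria out) := by unfold Spec_prepara_categoria; infer_instance

-- ===== CLAIM (what is proved, stated in full; the proofs are below) =====
def Claim_equal_prepara_categoria : Prop := ∀ (categoria : String), Dom_prepara_categoria categoria → Spec_prepara_categoria categoria (prepara_categoria categoria)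

-- ===== LEMMAS AND PROOFS =====

/-- Split a character list on a single delimiter character (Python split semantics). -/
def splitCh (d : Char) : List Char → List (List Char)
  | [] => [[]]
  | c :: t => if c = d then [] :: splitCh d t else (splitCh d t).modifyHead (c :: ·)

lemma splitCh_ne_nil (d : Char) (l : List Char) : splitCh d l ≠ [] := by
  induction l with
  | nil => simp [splitCh]
  | cons c t ih =>
    simp only [splitCh]
    split
    · simp
    · cases hs : splitCh d t with
      | nil => exact absurd hs ih
      | cons a b => simp [List.modifyHead]

lemma replace_go_single (c : Char) (new : List Char) :
    ∀ (fuel : Nat) (l acc : List Char), l.length ≤ fuel →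
      PySem.Chars.replace.go [c] new fuel l acc
        = acc.reverse ++ l.flatMap (fun x => if x = c then new else [x]) := by
  intro fuel
  induction fuel with
  | zero =>
    intro l acc h
    have : l = [] := List.length_eq_zero_iff.mp (Nat.le_zero.mp h)
    subst this; simp [PySem.Chars.replace.go]
  | succ n ih =>
    intro l acc h
    cases l with
    | nil => simp [PySem.Chars.replace.go]
    | cons x t =>
      simp only [PySem.Chars.replace.go]
      by_cases hx : x = c
      · subst hx
        simp only [List.isPrefixOf, BEq.rfl, Bool.true_and, if_true]
        simp only [List.length_cons, List.length_nil, Nat.zero_add, List.drop_succ_cons, List.drop_zero]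
        rw [ih t (new.reverse ++ acc) (by simpa using Nat.lt_succ_iff.mp (by simpa using h))]
        simp [List.flatMap_cons]
      · have : [c].isPrefixOf (x :: t) = false := by
          simp [List.isPrefixOf]; exact fun h' => hx h'.symm
        rw [this]
        simp only [Bool.false_eq_true, if_false]
        rw [ih t (x :: acc) (by simpa using Nat.lt_succ_iff.mp (by simpa using h))]
        simp [List.flatMap_cons, hx]

lemma replace_single (s : List Char) (c : Char) (new : List Char) :
    PySem.Chars.replace s [c] new = s.flatMap (fun x => if x = c then new else [x]) := by
  rw [PySem.Chars.replace]
  simp only [List.isEmpty_cons, Bool.false_eq_true, if_false]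
  simpa using replace_go_single c new s.length s [] (le_refl _)

lemma splitOn_go_single (d : Char) :
    ∀ (fuel : Nat) (l cur : List Char) (acc : List (List Char)), l.length ≤ fuel →
      PySem.Chars.splitOn.go [d] fuel l cur acc
        = acc.reverse ++ (splitCh d l).modifyHead (cur.reverse ++ ·) := by
  intro fuel
  induction fuel with
  | zero =>
    intro l cur acc h
    have : l = [] := List.length_eq_zero_iff.mp (Nat.le_zero.mp h)
    subst this; simp [PySem.Chars.splitOn.go, splitCh, List.modifyHead]
  | succ n ih =>
    intro l cur acc h
    cases l with
    | nil => simp [PySem.Chars.splitOn.go, splitCh, List.modifyHead]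
    | cons x t =>
      simp only [PySem.Chars.splitOn.go]
      by_cases hx : x = d
      · subst hx
        simp only [List.isPrefixOf, BEq.rfl, Bool.true_and, if_true]
        simp only [List.length_cons, List.length_nil, Nat.zero_add, List.drop_succ_cons, List.drop_zero]
        rw [ih t [] (cur.reverse :: acc) (by simpa using Nat.lt_succ_iff.mp (by simpa using h))]
        cases hs : splitCh x t with
        | nil => exact absurd hs (splitCh_ne_nil _ _)
        | cons a b => simp [splitCh, hs, List.modifyHead]
      · have : [d].isPrefixOf (x :: t) = false := by
          simp [List.isPrefixOf]; exact fun h' => hx h'.symm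
        rw [this]
        simp only [Bool.false_eq_true, if_false]
        rw [ih t (x :: cur) acc (by simpa using Nat.lt_succ_iff.mp (by simpa using h))]
        cases hs : splitCh d t with
        | nil => exact absurd hs (splitCh_ne_nil d t)
        | cons a b => simp [splitCh, hx, hs, List.modifyHead]

lemma splitOn_single (s : List Char) (d : Char) :
    PySem.Chars.splitOn s [d] = splitCh d s := by
  rw [PySem.Chars.splitOn]
  rw [splitOn_go_single d (s.length + 1) s [] [] (Nat.le_succ _)]
  cases hs : splitCh d s with
  | nil => exact absurd hs (splitCh_ne_nil d s)
  | cons a b => simp [List.modifyHead]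

/-- The character transformation both programs effectively perform. -/
def gA (c : Char) : Option Char :=
  if c ∈ "|[1234567890".toList then none
  else if c = ']' then some ','
  else some c

lemma delA_toList : "|[1234567890".toList = ['|','[','1','2','3','4','5','6','7','8','9','0'] := by decide

lemma delB_toList : "|[0123456789".toList = ['|','[','0','1','2','3','4','5','6','7','8','9'] := by decide

lemma brk_toList : "],".toList = [']',','] := by decide

lemma foldB (cs : List Char) :
    ∀ (res : List String) (cur : String),
      (cs.foldl pcStep (res, cur)).1
        = res ++ (List.map String.ofList
            ((splitCh ',' (cs.filterMap gA)).modifyHead (cur.toList ++ ·))).dropLast := by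
  induction cs with
  | nil => intro res cur; simp [splitCh, List.modifyHead]
  | cons c t ih =>
    intro res cur
    by_cases hdel : c ∈ "|[1234567890".toList
    · have hmem : c = '|' ∨ c = '[' ∨ c = '1' ∨ c = '2' ∨ c = '3' ∨ c = '4' ∨ c = '5' ∨
          c = '6' ∨ c = '7' ∨ c = '8' ∨ c = '9' ∨ c = '0' := by
        rw [delA_toList] at hdel
        simpa using hdel
      have hstep : pcStep (res, cur) c = (res, cur) := by
        have : ("|[0123456789".toList.contains c) = true := by
          rw [delB_toList]
          rcases hmem with h|h|h|h|h|h|h|h|h|h|h|h <;> subst h <;> decide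
        unfold pcStep; rw [this]; simp
      have hg : gA c = none := by unfold gA; rw [if_pos hdel]
      simp only [List.foldl_cons, hstep, List.filterMap_cons, hg]
      exact ih res cur
    · have h1 : ("|[0123456789".toList.contains c) = false := by
        rw [delB_toList]
        simp only [List.contains_eq_mem, decide_eq_false_iff_not]
        intro hm; apply hdel
        rw [delA_toList]
        simp only [List.mem_cons, List.not_mem_nil, or_false] at hm ⊢
        tauto
      by_cases hdelim : c = ']' ∨ c = ','
      · have hstep : pcStep (res, cur) c = (res ++ [cur], "") := by
          have h2 : ("],".toList.contains c) = true := by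
            rw [brk_toList]
            rcases hdelim with h | h <;> subst h <;> decide
          unfold pcStep; rw [h1, h2]; simp
        have hg : gA c = some ',' := by
          unfold gA; rw [if_neg hdel]
          rcases hdelim with h | h
          · rw [if_pos h]
          · subst h; rw [if_neg (by decide)]
        simp only [List.foldl_cons, hstep, List.filterMap_cons, hg]
        rw [ih (res ++ [cur]) ""]
        cases hs : splitCh ',' (t.filterMap gA) with
        | nil => exact absurd hs (splitCh_ne_nil _ _)
        | cons a b =>
          simp [splitCh, hs, List.modifyHead, List.dropLast_cons_of_ne_nil]
      · rw [not_or] at hdelim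
        have hstep : pcStep (res, cur) c = (res, cur.push c) := by
          have h2 : ("],".toList.contains c) = false := by
            rw [brk_toList]
            simp only [List.contains_eq_mem, decide_eq_false_iff_not]
            simp only [List.mem_cons, List.not_mem_nil, or_false]
            tauto
          unfold pcStep; rw [h1, h2]; simp
        have hg : gA c = some c := by unfold gA; rw [if_neg hdel, if_neg hdelim.1]
        simp only [List.foldl_cons, hstep, List.filterMap_cons, hg]
        rw [ih res (cur.push c)]
        cases hs : splitCh ',' (t.filterMap gA) with
        | nil => exact absurd hs (splitCh_ne_nil _ _)
        | cons a b =>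
          simp [splitCh, hs, hdelim.2, List.modifyHead, String.toList_push]

lemma del_one (l : List Char) (c : Char) :
    (l.flatMap fun x => if x = c then [] else [x]) = l.filter (fun x => x != c) := by
  induction l with
  | nil => rfl
  | cons a t ih =>
    by_cases h : a = c <;> simp [List.flatMap_cons, h, ih]

lemma filterMap_gA (l : List Char) :
    ((l.filter (fun x => !("|[1234567890".toList.contains x))).flatMap
        (fun x => if x = ']' then [','] else [x])) = l.filterMap gA := by
  induction l with
  | nil => rfl
  | cons c t ih =>
    by_cases hdel : c ∈ "|[1234567890".toList
    · have hc : ("|[1234567890".toList.contains c) = true := by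
        simpa [List.contains_eq_mem] using hdel
      have hg : gA c = none := by unfold gA; rw [if_pos hdel]
      simp only [List.filter_cons, hc, Bool.not_true, List.filterMap_cons, hg]
      exact ih
    · have hc : ("|[1234567890".toList.contains c) = false := by
        simp only [List.contains_eq_mem, decide_eq_false_iff_not]
        intro hm
        rw [delA_toList] at hdel
        rw [delA_toList] at hm
        exact hdel hm
      by_cases hb : c = ']'
      · have hg : gA c = some ',' := by unfold gA; rw [if_neg hdel, if_pos hb]
        subst hb
        simp only [List.filter_cons, hc, Bool.not_false, if_true, List.flatMap_cons,
          List.filterMap_cons, hg, ih]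
        simp
      · have hg : gA c = some c := by unfold gA; rw [if_neg hdel, if_neg hb]
        simp only [List.filter_cons, hc, Bool.not_false, if_true, List.flatMap_cons,
          List.filterMap_cons, hg, hb, if_false, ih]
        simp

lemma split_comma_dropLast (s : String) :
    (Option.map (fun parts => PySem.List.slice parts none (some (-1)))
        (PySem.Str.split? s ",")).getD []
      = List.map String.ofList ((splitCh ',' s.toList).dropLast) := by
  have h := PySem.Str.split?_map s ","
  have hc : PySem.Chars.split? s.toList ",".toList = some (splitCh ',' s.toList) := by
    rw [PySem.Chars.split?]
    rw [if_neg (by decide)]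
    have : ",".toList = [','] := by decide
    rw [this, splitOn_single]
  rw [hc] at h
  cases hsp : PySem.Str.split? s "," with
  | none => rw [hsp] at h; simp at h
  | some parts =>
    rw [hsp] at h
    simp only [Option.map_some, Option.some.injEq] at h
    simp only [Option.map_some, Option.getD_some]
    rw [PySem.List.slice_to_neg_one]
    rw [← h, ← List.map_dropLast]
    rw [List.map_map]
    have hco : String.ofList ∘ String.toList = id := funext fun z => String.ofList_toList
    rw [hco, List.map_id]

lemma pred12 (x : Char) :
    (x != '0' &&
        (x != '9' &&
          (x != '8' &&
            (x != '7' &&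
              (x != '6' &&
                (x != '5' && (x != '4' && (x != '3' && (x != '2' && (x != '1' && (x != '[' && x != '|')))))))))))
      = !("|[1234567890".toList.contains x) := by
  rw [delA_toList]
  by_cases h : x ∈ (['|','[','1','2','3','4','5','6','7','8','9','0'] : List Char)
  · have hc : (['|','[','1','2','3','4','5','6','7','8','9','0'] : List Char).contains x = true := by
      simpa [List.contains_eq_mem] using h
    rw [hc]
    simp only [List.mem_cons, List.not_mem_nil, or_false] at h
    rcases h with h|h|h|h|h|h|h|h|h|h|h|h <;> subst h <;> decide
  · have hc : (['|','[','1','2','3','4','5','6','7','8','9','0'] : List Char).contains x = false := by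
      simp only [List.contains_eq_mem, decide_eq_false_iff_not]; exact h
    rw [hc]
    simp only [List.mem_cons, not_or] at h
    obtain ⟨h1,h2,h3,h4,h5,h6,h7,h8,h9,h10,h11,h12⟩ := h
    simp [bne_iff_ne, h1,h2,h3,h4,h5,h6,h7,h8,h9,h10,h11,h12]

-- ===== VERDICT (by name: the statement is the Claim_ definition above) =====
set_option maxRecDepth 8192 in
theorem prepara_categoria_spec : Claim_equal_prepara_categoria := by
  intro categoria _
  simp only [Spec_prepara_categoria, prepara_categoria, prepara_categoria_alt]
  have hr : PySem.List.pyRange 0 (PySem.Str.len "|[1234567890") 1 = [0,1,2,3,4,5,6,7,8,9,10,11] := by decide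
  rw [hr]
  simp only [List.foldl_cons, List.foldl_nil]
  rw [show PySem.Str.pyGet? "|[1234567890" 0 = some '|' from by decide,
      show PySem.Str.pyGet? "|[1234567890" 1 = some '[' from by decide,
      show PySem.Str.pyGet? "|[1234567890" 2 = some '1' from by decide,
      show PySem.Str.pyGet? "|[1234567890" 3 = some '2' from by decide,
      show PySem.Str.pyGet? "|[1234567890" 4 = some '3' from by decide,
      show PySem.Str.pyGet? "|[1234567890" 5 = some '4' from by decide,
      show PySem.Str.pyGet? "|[1234567890" 6 = some '5' from by decide,
      show PySem.Str.pyGet? "|[1234567890" 7 = some '6' from by decide,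
      show PySem.Str.pyGet? "|[1234567890" 8 = some '7' from by decide,
      show PySem.Str.pyGet? "|[1234567890" 9 = some '8' from by decide,
      show PySem.Str.pyGet? "|[1234567890" 10 = some '9' from by decide,
      show PySem.Str.pyGet? "|[1234567890" 11 = some '0' from by decide]
  rw [split_comma_dropLast]
  rw [foldB]
  simp only [List.nil_append, String.toList_empty]
  have hmod : List.modifyHead (fun x : List Char => x)
      (splitCh ',' (categoria.toList.filterMap gA)) = splitCh ',' (categoria.toList.filterMap gA) := by
    rw [show (fun x : List Char => x) = (id : List Char → List Char) from rfl, List.modifyHead_id, id_eq]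
  rw [hmod]
  rw [List.map_dropLast]
  refine congrArg (fun l => (List.map String.ofList (splitCh ',' l)).dropLast) ?_
  -- toList of the replace chain
  simp only [PySem.Str.toList_replace, String.toList_ofList]
  rw [show "]".toList = [']'] from by decide, show ",".toList = [','] from by decide,
      show "".toList = ([] : List Char) from by decide]
  simp only [replace_single, del_one]
  simp only [List.filter_filter]
  rw [List.filter_congr (fun x _ => pred12 x)]
  exact filterMap_gA categoria.toList
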